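-- pv_equiv track=rewrite | github.com/Pray3r/extract-snippets-linux-kernel | src/extractors/plugins/kernel_logging_extractor_plugin.py | extract_snippets
-- ===== SOURCE A (Python) =====
-- def extract_snippets(source_code):
--     """
--     Extract snippets related to kernel logging mechanisms.
--     """
--     snippets = []
--     logging_keywords = ["printk", "pr_info", "pr_err", "pr_debug", "log_buf"]
--     for keyword in logging_keywords:
--         start_pos = source_code.find(keyword)
--         while start_pos != -1:
--             end_pos = source_code.find(";", start_pos)
--             snippet = source_code[start_pos:end_pos + 1]
--             if snippet:
--                 snippets.append(snippet)
--             start_pos = source_code.find(keyword, start_pos + 1)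
--     return snippets
-- ===== SOURCE B (Python) =====
-- def extract_snippets(source_code):
--     """
--     Extract snippets related to kernel logging mechanisms.
--     """
--     logging_keywords = ["printk", "pr_info", "pr_err", "pr_debug", "log_buf"]
--     buckets = {kw: [] for kw in logging_keywords}
--     for i in range(len(source_code)):
--         for keyword in logging_keywords:
--             if source_code.startswith(keyword, i):
--                 end_pos = source_code.find(";", i)
--                 snippet = source_code[i:end_pos + 1]
--                 if snippet:
--                     buckets[keyword].append(snippet)
--                 break
--     out = []
--     for keyword in logging_keywords:
--         out.extend(buckets[keyword])
--     return out
-- ===== Notes on version B (the rewrite author's own statement) =====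
-- stated objective: alternative
-- what changed: Replaced A's five per-keyword find-chains over the whole text by one left-to-right positional scan that drops each nonempty snippet into a per-keyword bucket dict and concatenates the buckets in the fixed keyword order.
import Mathlib
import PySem

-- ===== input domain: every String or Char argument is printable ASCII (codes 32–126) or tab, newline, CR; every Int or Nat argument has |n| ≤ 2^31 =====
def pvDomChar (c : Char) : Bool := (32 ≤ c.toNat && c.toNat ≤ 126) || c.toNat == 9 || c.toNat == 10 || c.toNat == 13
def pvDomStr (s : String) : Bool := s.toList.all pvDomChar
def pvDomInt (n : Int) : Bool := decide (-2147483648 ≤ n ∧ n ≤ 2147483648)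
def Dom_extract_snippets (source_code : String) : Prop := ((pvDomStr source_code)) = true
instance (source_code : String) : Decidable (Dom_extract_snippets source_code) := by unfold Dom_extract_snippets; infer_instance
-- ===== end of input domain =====

-- B replaces A's five repeated find-chains over the whole text (one per keyword) by a single
-- left-to-right positional scan that appends each snippet into a per-keyword bucket dict and
-- finally concatenates the buckets in the fixed keyword order (objective: alternative).

-- ===== PORT A =====
-- A's inner while loop ('start_pos = find(keyword, …)' chain); fuel = len(source)+1 bounds the
-- iteration count, since each found position is strictly larger than the previous start.

def pvLoopA (s : String) (kw : String) : Nat → Int → List String → List String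
  | 0, _, acc => acc
  | fuel + 1, startPos, acc =>
    if startPos = -1 then acc
    else
      let endPos := PySem.Str.findFrom s ";" startPos
      let snippet := PySem.Str.slice s (some startPos) (some (endPos + 1))
      let acc' := if snippet = "" then acc else acc ++ [snippet]
      pvLoopA s kw fuel (PySem.Str.findFrom s kw (startPos + 1)) acc'

def extract_snippets (source_code : String) : List String :=
  let logging_keywords := ["printk", "pr_info", "pr_err", "pr_debug", "log_buf"]
  logging_keywords.foldl
    (fun snippets kw =>
      pvLoopA source_code kw (source_code.toList.length + 1) (PySem.Str.find source_code kw) snippets)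
    []

-- ===== PORT B =====
-- Source B's inner 'for keyword in …: if startswith: …; break' loop at one position i;
-- source_code.startswith(keyword, i) with 0 ≤ i is exactly: keyword prefixes drop i.toNat.
def pvMatchStep (s : String) (i : Int) (buckets : PySem.Dict String (List String)) :
    List String → PySem.Dict String (List String)
  | [] => buckets
  | kw :: rest =>
    if PySem.Chars.startswith (s.toList.drop i.toNat) kw.toList then
      let endPos := PySem.Str.findFrom s ";" i
      let snippet := PySem.Str.slice s (some i) (some (endPos + 1))
      if snippet = "" then buckets
      else PySem.Dict.modify buckets kw [] (fun l => l ++ [snippet])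
    else pvMatchStep s i buckets rest
def extract_snippets_alt (source_code : String) : List String :=
  let logging_keywords := ["printk", "pr_info", "pr_err", "pr_debug", "log_buf"]
  let buckets0 : PySem.Dict String (List String) :=
    logging_keywords.foldl (fun d kw => d.insert kw []) ⟨[]⟩
  let buckets :=
    (PySem.List.pyRange 0 (PySem.Str.len source_code) 1).foldl
      (fun b i => pvMatchStep source_code i b logging_keywords) buckets0
  logging_keywords.foldl (fun out kw => out ++ PySem.Dict.getD buckets kw []) []

-- ===== PRECONDITION & SPEC =====
def Spec_extract_snippets (source_code : String) (out : List String) : Prop := out = extract_snippets_alt source_code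
instance (source_code : String) (out : List String) : Decidable (Spec_extract_snippets source_code out) := by unfold Spec_extract_snippets; infer_instance

-- ===== CLAIM (what is proved, stated in full; the proofs are below) =====
def Claim_equal_extract_snippets : Prop := ∀ (source_code : String), Dom_extract_snippets source_code → Spec_extract_snippets source_code (extract_snippets source_code)

-- ===== LEMMAS AND PROOFS =====

-- the snippet taken at position i: source_code[i : source_code.find(';', i) + 1]

def pvSnip (s : String) (i : Nat) : String :=
  PySem.Str.slice s (some (i : Int)) (some (PySem.Str.findFrom s ";" (i : Int) + 1))

-- all nonempty snippets for one keyword, match positions in increasing order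
def pvPerKw (s : String) (kw : String) : List String :=
  ((((List.range s.toList.length).filter
      (fun i => PySem.Chars.startswith (s.toList.drop i) kw.toList)).map
      (fun i => pvSnip s i)).filter (fun t => t ≠ ""))

-- bucket contents of B after scanning positions [0, i)
def pvBucket (s : String) (kw : String) (i : Nat) : List String :=
  ((((List.range i).filter
      (fun i => PySem.Chars.startswith (s.toList.drop i) kw.toList)).map
      (fun i => pvSnip s i)).filter (fun t => t ≠ ""))

lemma pvFilterRangeNil (P : Nat → Bool) (k n : Nat)
    (h : ∀ i, k ≤ i → i < n → P i = false) :
    (List.range n).filter (fun i => decide (k ≤ i) && P i) = [] := by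
  induction n with
  | zero => rfl
  | succ n ih =>
    rw [List.range_succ, List.filter_append, ih (fun i hk hi => h i hk (by omega))]
    by_cases hk : k ≤ n
    · simp [h n hk (by omega)]
    · simp [hk]

lemma pvFilterRangeCons (P : Nat → Bool) (k m n : Nat)
    (hkm : k ≤ m) (hmn : m < n) (hPm : P m = true)
    (hmin : ∀ i, k ≤ i → i < m → P i = false) :
    (List.range n).filter (fun i => decide (k ≤ i) && P i)
      = m :: (List.range n).filter (fun i => decide (m + 1 ≤ i) && P i) := by
  induction n with
  | zero => omega
  | succ n ih =>
    rcases Nat.lt_or_ge m n with h | h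
    · rw [List.range_succ, List.filter_append, List.filter_append, ih h]
      have : (decide (k ≤ n) && P n) = (decide (m + 1 ≤ n) && P n) := by
        by_cases hp : P n = true
        · simp [hp]; omega
        · simp [Bool.eq_false_iff.mpr (by simpa using hp)]
      simp only [List.filter, this]
      simp
    · have hnm : m = n := by omega
      subst hnm
      rw [List.range_succ, List.filter_append, List.filter_append,
        pvFilterRangeNil P k m hmin,
        pvFilterRangeNil P (m+1) m (fun i h1 h2 => by omega)]
      simp [hkm, hPm]

lemma pvInfixOfPrefixDrop {sl kwl : List Char} {k i : Nat} (hk : k ≤ i)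
    (h : kwl <+: sl.drop i) : kwl <:+: sl.drop k := by
  have hd : sl.drop i = (sl.drop k).drop (i - k) := by
    rw [List.drop_drop]; congr 1; omega
  rw [hd] at h
  exact List.IsInfix.trans h.isInfix (List.drop_suffix _ _).isInfix

lemma pvLoopA_eq (s kw : String) (hkw : kw.toList ≠ []) :
    ∀ (fuel k : Nat) (acc : List String), k ≤ s.toList.length →
    s.toList.length + 1 - k ≤ fuel →
    pvLoopA s kw fuel (PySem.Chars.findFrom s.toList kw.toList (k : Int)) acc
      = acc ++ ((((List.range s.toList.length).filter
          (fun i => decide (k ≤ i) && PySem.Chars.startswith (s.toList.drop i) kw.toList)).map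
          (fun i => pvSnip s i)).filter (fun t => t ≠ "")) := by
  intro fuel
  induction fuel with
  | zero => intro k acc hk hf; omega
  | succ fuel ih =>
    intro k acc hk hf
    by_cases hr : PySem.Chars.findFrom s.toList kw.toList (k : Int) = -1
    · rw [hr]
      have hno : ∀ i, k ≤ i → i < s.toList.length →
          PySem.Chars.startswith (s.toList.drop i) kw.toList = false := by
        intro i h1 h2
        rw [(PySem.Chars.findFrom_natCast_eq_neg_one_iff s.toList kw.toList k hk)] at hr
        by_contra hc
        exact hr (pvInfixOfPrefixDrop h1 (by
          rw [Bool.not_eq_false, PySem.Chars.startswith_iff] at hc; exact hc))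
      rw [pvFilterRangeNil _ k _ hno]
      simp [pvLoopA]
    · obtain ⟨h1, h2, h3⟩ := PySem.Chars.findFrom_natCast_spec s.toList kw.toList k hk hr
      set r := PySem.Chars.findFrom s.toList kw.toList (k : Int) with hrdef
      have hr0 : 0 ≤ r := le_trans (by exact_mod_cast Int.natCast_nonneg k) h1
      set m := r.toNat with hm
      have hkm : k ≤ m := by omega
      have hmn : m < s.toList.length := by
        by_contra hc
        have : s.toList.drop m = [] := List.drop_eq_nil_of_le (by omega)
        rw [this] at h2
        exact hkw (List.prefix_nil.mp h2)
      rw [pvFilterRangeCons _ k m _ hkm hmn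
        (by rw [PySem.Chars.startswith_iff]; exact h2)
        (fun i hki him => by
          rw [Bool.eq_false_iff]
          intro hc
          rw [PySem.Chars.startswith_iff] at hc
          exact h3 i hki him hc)]
      simp only [pvLoopA]
      rw [if_neg hr]
      have hnext : r + 1 = ((m + 1 : Nat) : Int) := by omega
      simp only [PySem.Str.findFrom_eq]
      rw [hnext, ih (m+1) _ (by omega) (by omega)]
      have hrm : r = ((m : Nat) : Int) := by omega
      rw [hrm]
      have hsnip : PySem.Str.slice s (some ((m : Nat) : Int))
          (some (PySem.Chars.findFrom s.toList ";".toList ((m : Nat) : Int) + 1)) = pvSnip s m := rfl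
      rw [hsnip]
      by_cases he : pvSnip s m = "" <;> simp [he]

lemma pvA_step (s : String) (kw : String) (hkw : kw.toList ≠ []) (acc : List String) :
    pvLoopA s kw (s.toList.length + 1) (PySem.Str.find s kw) acc = acc ++ pvPerKw s kw := by
  have hf : PySem.Str.find s kw = PySem.Chars.findFrom s.toList kw.toList ((0 : Nat) : Int) := by
    simp
  rw [hf, pvLoopA_eq s kw hkw (s.toList.length + 1) 0 acc (Nat.zero_le _) (by omega)]
  unfold pvPerKw
  congr 3

lemma pvA_eq (s : String) :
    extract_snippets s =
      pvPerKw s "printk" ++ pvPerKw s "pr_info" ++ pvPerKw s "pr_err"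
        ++ pvPerKw s "pr_debug" ++ pvPerKw s "log_buf" := by
  show (List.foldl
      (fun snippets kw => pvLoopA s kw (s.toList.length + 1) (PySem.Str.find s kw) snippets)
      [] ["printk", "pr_info", "pr_err", "pr_debug", "log_buf"]) = _
  simp only [List.foldl]
  rw [pvA_step s "printk" (by decide), pvA_step s "pr_info" (by decide),
    pvA_step s "pr_err" (by decide), pvA_step s "pr_debug" (by decide),
    pvA_step s "log_buf" (by decide)]
  simp [List.append_assoc]

lemma pvUniqueMatch {l a b : List Char} (hab : ¬ a <+: b) (hba : ¬ b <+: a)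
    (ha : a <+: l) : ¬ b <+: l := by
  intro hb
  rcases List.prefix_or_prefix_of_prefix ha hb with h | h
  · exact hab h
  · exact hba h

lemma pvNotSW {s : String} {i : Nat} {a b : String}
    (h : PySem.Chars.startswith (s.toList.drop i) a.toList = true)
    (hab : ¬ (a.toList <+: b.toList)) (hba : ¬ (b.toList <+: a.toList)) :
    PySem.Chars.startswith (s.toList.drop i) b.toList = false := by
  rw [Bool.eq_false_iff]
  intro hc
  rw [PySem.Chars.startswith_iff] at h hc
  exact pvUniqueMatch hab hba h hc

lemma pvBucket_succ (s kw : String) (i : Nat) :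
    pvBucket s kw (i + 1) =
      pvBucket s kw i ++
        (if PySem.Chars.startswith (s.toList.drop i) kw.toList
          then (if pvSnip s i = "" then [] else [pvSnip s i]) else []) := by
  unfold pvBucket
  rw [List.range_succ, List.filter_append, List.map_append, List.filter_append]
  by_cases hm : PySem.Chars.startswith (s.toList.drop i) kw.toList
  · by_cases he : pvSnip s i = "" <;> simp [hm, he]
  · simp [hm]

lemma pvScan_inv (s : String) (i : Nat) (hi : i ≤ s.toList.length) :
    (PySem.List.pyRange 0 (i : Int) 1).foldl
        (fun b j => pvMatchStep s j b ["printk", "pr_info", "pr_err", "pr_debug", "log_buf"])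
        ⟨[("printk", []), ("pr_info", []), ("pr_err", []), ("pr_debug", []), ("log_buf", [])]⟩
      = ⟨[("printk", pvBucket s "printk" i), ("pr_info", pvBucket s "pr_info" i),
          ("pr_err", pvBucket s "pr_err" i), ("pr_debug", pvBucket s "pr_debug" i),
          ("log_buf", pvBucket s "log_buf" i)]⟩ := by
  induction i with
  | zero =>
    rw [PySem.List.pyRange_one_eq_nil (by norm_num)]
    rfl
  | succ i ih =>
    rw [Nat.cast_add, Nat.cast_one, PySem.List.pyRange_one_succ_right (by positivity),
      List.foldl_append, ih (by omega)]
    simp only [List.foldl]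
    -- one step at position i
    simp only [pvMatchStep, Int.toNat_natCast]
    rw [pvBucket_succ s "printk" i, pvBucket_succ s "pr_info" i, pvBucket_succ s "pr_err" i,
      pvBucket_succ s "pr_debug" i, pvBucket_succ s "log_buf" i]
    have hsnip : PySem.Str.slice s (some ((i : Nat) : Int))
        (some (PySem.Str.findFrom s ";" ((i : Nat) : Int) + 1)) = pvSnip s i := rfl
    by_cases h1 : PySem.Chars.startswith (s.toList.drop i) "printk".toList
    · have n2 := pvNotSW h1 (b := "pr_info") (by decide) (by decide)
      have n3 := pvNotSW h1 (b := "pr_err") (by decide) (by decide)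
      have n4 := pvNotSW h1 (b := "pr_debug") (by decide) (by decide)
      have n5 := pvNotSW h1 (b := "log_buf") (by decide) (by decide)
      rw [if_pos h1, hsnip]
      simp only [h1, n2, n3, n4, n5]
      by_cases he : pvSnip s i = ""
      · simp [he]
      · rw [if_neg he]
        simp only [he]
        simp [PySem.Dict.modify, PySem.Dict.insert, PySem.Dict.contains, PySem.Dict.get?,
          PySem.Dict.getD]
    · rw [Bool.not_eq_true] at h1
      by_cases h2 : PySem.Chars.startswith (s.toList.drop i) "pr_info".toList
      · have n3 := pvNotSW h2 (b := "pr_err") (by decide) (by decide)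
        have n4 := pvNotSW h2 (b := "pr_debug") (by decide) (by decide)
        have n5 := pvNotSW h2 (b := "log_buf") (by decide) (by decide)
        rw [if_pos h2, hsnip]
        simp only [h1, h2, n3, n4, n5]
        by_cases he : pvSnip s i = ""
        · simp [he]
        · rw [if_neg he]
          simp only [he]
          simp [PySem.Dict.modify, PySem.Dict.insert, PySem.Dict.contains, PySem.Dict.get?,
            PySem.Dict.getD]
      · rw [Bool.not_eq_true] at h2
        by_cases h3 : PySem.Chars.startswith (s.toList.drop i) "pr_err".toList
        · have n4 := pvNotSW h3 (b := "pr_debug") (by decide) (by decide)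
          have n5 := pvNotSW h3 (b := "log_buf") (by decide) (by decide)
          rw [if_pos h3, hsnip]
          simp only [h1, h2, h3, n4, n5]
          by_cases he : pvSnip s i = ""
          · simp [he]
          · rw [if_neg he]
            simp only [he]
            simp [PySem.Dict.modify, PySem.Dict.insert, PySem.Dict.contains, PySem.Dict.get?,
              PySem.Dict.getD]
        · rw [Bool.not_eq_true] at h3
          by_cases h4 : PySem.Chars.startswith (s.toList.drop i) "pr_debug".toList
          · have n5 := pvNotSW h4 (b := "log_buf") (by decide) (by decide)
            rw [if_pos h4, hsnip]
            simp only [h1, h2, h3, h4, n5]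
            by_cases he : pvSnip s i = ""
            · simp [he]
            · rw [if_neg he]
              simp only [he]
              simp [PySem.Dict.modify, PySem.Dict.insert, PySem.Dict.contains, PySem.Dict.get?,
                PySem.Dict.getD]
          · rw [Bool.not_eq_true] at h4
            by_cases h5 : PySem.Chars.startswith (s.toList.drop i) "log_buf".toList
            · rw [if_pos h5, hsnip]
              simp only [h1, h2, h3, h4, h5]
              by_cases he : pvSnip s i = ""
              · simp [he]
              · rw [if_neg he]
                simp only [he]
                simp [PySem.Dict.modify, PySem.Dict.insert, PySem.Dict.contains, PySem.Dict.get?,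
                  PySem.Dict.getD]
            · rw [Bool.not_eq_true] at h5
              simp only [h1, h2, h3, h4, h5]
              simp

lemma pvB_eq (s : String) :
    extract_snippets_alt s =
      pvPerKw s "printk" ++ pvPerKw s "pr_info" ++ pvPerKw s "pr_err"
        ++ pvPerKw s "pr_debug" ++ pvPerKw s "log_buf" := by
  show (List.foldl (fun out kw => out ++ PySem.Dict.getD
      (List.foldl (fun b i => pvMatchStep s i b ["printk", "pr_info", "pr_err", "pr_debug", "log_buf"])
        (List.foldl (fun (d : PySem.Dict String (List String)) kw => d.insert kw []) ⟨[]⟩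
          ["printk", "pr_info", "pr_err", "pr_debug", "log_buf"])
        (PySem.List.pyRange 0 (PySem.Str.len s) 1)) kw [])
      [] ["printk", "pr_info", "pr_err", "pr_debug", "log_buf"]) = _
  have hb0 : (["printk", "pr_info", "pr_err", "pr_debug", "log_buf"].foldl
      (fun (d : PySem.Dict String (List String)) kw => d.insert kw []) ⟨[]⟩)
      = ⟨[("printk", []), ("pr_info", []), ("pr_err", []), ("pr_debug", []), ("log_buf", [])]⟩ := by
    rfl
  have hlen : PySem.Str.len s = ((s.toList.length : Nat) : Int) := by
    simp [PySem.Str.len]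
  rw [hb0, hlen, pvScan_inv s s.toList.length le_rfl]
  simp only [List.foldl]
  simp [PySem.Dict.getD, PySem.Dict.get?, pvPerKw, pvBucket]

-- ===== VERDICT (by name: the statement is the Claim_ definition above) =====
theorem extract_snippets_spec : Claim_equal_extract_snippets := by
  intro s _
  unfold Spec_extract_snippets
  rw [pvA_eq, pvB_eq]
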